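-- pv_equiv track=rewrite | github.com/keithoma/math_code | algorithms/balance_puzzle.py | balance_puzzle
-- ===== SOURCE A (Python) =====
-- def balance_puzzle(coins, index=0):
--     length = len(coins)
--     if length <= 1:
--         return index
--
--     def the_part_nobody_cares_about(length):
--         remainder = length % 3
--         def aux(remainder): return remainder if remainder < 2 else -1
--
--         n0 = 0
--         n1 = int(((length - aux(remainder)) / 3))
--         n2 = int(2 * int((length - aux(remainder)) / 3))
--         return n0, n1, n2
--
--     n0, n1, n2 = the_part_nobody_cares_about(length)
--
--     if sum(coins[:n1]) > sum(coins[n1:n2]):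
--         return balance_puzzle(coins[:n1], index + n0)
--     elif sum(coins[:n1]) < sum(coins[n1:n2]):
--         return balance_puzzle(coins[n1:n2], index + n1)
--     elif sum(coins[:n1]) == sum(coins[n1:n2]):
--         return balance_puzzle(coins[n2:], index + n2)
-- ===== SOURCE B (Python) =====
-- def balance_puzzle(coins, index=0):
--     lo, hi, offset = 0, len(coins), index
--     while hi - lo > 1:
--         length = hi - lo
--         remainder = length % 3
--         aux = remainder if remainder < 2 else -1
--         n1 = (length - aux) // 3
--         s1 = sum(coins[lo:lo + n1])
--         s2 = sum(coins[lo + n1:lo + 2 * n1])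
--         if s1 > s2:
--             hi = lo + n1
--         elif s1 < s2:
--             lo, hi, offset = lo + n1, lo + 2 * n1, offset + n1
--         else:
--             lo, offset = lo + 2 * n1, offset + 2 * n1
--     return offset
-- ===== Notes on version B (the rewrite author's own statement) =====
-- stated objective: alternative
-- what changed: Replaced A's recursion that allocates a fresh sublist at every level by an iterative while-loop keeping a window [lo, hi) over the original list plus an accumulated offset, summing blocks by index arithmetic.
import Mathlib
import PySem

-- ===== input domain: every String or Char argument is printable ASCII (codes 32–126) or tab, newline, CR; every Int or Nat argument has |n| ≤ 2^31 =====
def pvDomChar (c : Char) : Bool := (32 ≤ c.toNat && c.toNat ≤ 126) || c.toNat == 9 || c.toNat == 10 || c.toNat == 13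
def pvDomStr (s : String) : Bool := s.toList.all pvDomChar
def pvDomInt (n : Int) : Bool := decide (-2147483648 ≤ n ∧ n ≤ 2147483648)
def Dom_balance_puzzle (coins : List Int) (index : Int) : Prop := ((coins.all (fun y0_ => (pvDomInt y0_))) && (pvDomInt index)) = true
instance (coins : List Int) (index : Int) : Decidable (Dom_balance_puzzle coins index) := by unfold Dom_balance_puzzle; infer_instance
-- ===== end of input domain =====

-- B replaces A's recursion on freshly sliced sublists by an iterative window [lo, hi) over the
-- original list with an accumulated offset (objective: alternative decomposition, same cost).

-- ===== PORT A =====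
-- Python's n1 = int((length - aux)/3): 3 always divides (length - aux), so the float division is
-- exact and int(...) is exact truncating division, ported as PySem.Int.truncdiv.
def the_part_nobody_cares_about (length : Int) : Int × Int × Int :=
  let remainder := PySem.Int.mod length 3
  let aux := if remainder < 2 then remainder else -1
  (0, PySem.Int.truncdiv (length - aux) 3, 2 * PySem.Int.truncdiv (length - aux) 3)

-- fuel = coins.length + 1 always suffices (each recursive call strictly shrinks the list),
-- so the fuel-0 branch is unreachable from balance_puzzle; it only makes the recursion structural.
def balancePuzzleGo : Nat → List Int → Int → Int
  | 0, _, index => index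
  | fuel + 1, coins, index =>
    let length : Int := coins.length
    if length ≤ 1 then index
    else
      let t := the_part_nobody_cares_about length
      let n0 := t.1
      let n1 := t.2.1
      let n2 := t.2.2
      if (PySem.List.slice coins none (some n1)).sum > (PySem.List.slice coins (some n1) (some n2)).sum then
        balancePuzzleGo fuel (PySem.List.slice coins none (some n1)) (index + n0)
      else if (PySem.List.slice coins none (some n1)).sum < (PySem.List.slice coins (some n1) (some n2)).sum then
        balancePuzzleGo fuel (PySem.List.slice coins (some n1) (some n2)) (index + n1)
      else
        balancePuzzleGo fuel (PySem.List.slice coins (some n2) none) (index + n2)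

def balance_puzzle (coins : List Int) (index : Int) : Int :=
  balancePuzzleGo (coins.length + 1) coins index

-- ===== PORT B =====
-- the while-loop of Source B as a structural recursion on fuel; fuel = len + 1 bounds the
-- number of iterations (the window [lo, hi) strictly shrinks each round)
def bpLoopGo (coins : List Int) : Nat → Int → Int → Int → Int
  | 0, _, _, offset => offset
  | fuel + 1, lo, hi, offset =>
    if hi - lo ≤ 1 then offset
    else
      let length := hi - lo
      let remainder := PySem.Int.mod length 3
      let aux := if remainder < 2 then remainder else -1
      let n1 := PySem.Int.floordiv (length - aux) 3
      let s1 := (PySem.List.slice coins (some lo) (some (lo + n1))).sum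
      let s2 := (PySem.List.slice coins (some (lo + n1)) (some (lo + 2 * n1))).sum
      if s1 > s2 then bpLoopGo coins fuel lo (lo + n1) offset
      else if s1 < s2 then bpLoopGo coins fuel (lo + n1) (lo + 2 * n1) (offset + n1)
      else bpLoopGo coins fuel (lo + 2 * n1) hi (offset + 2 * n1)

def balance_puzzle_alt (coins : List Int) (index : Int) : Int :=
  bpLoopGo coins (coins.length + 1) 0 (coins.length : Int) index

-- ===== PRECONDITION & SPEC =====
def Spec_balance_puzzle (coins : List Int) (index : Int) (out : Int) : Prop := out = balance_puzzle_alt coins index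
instance (coins : List Int) (index : Int) (out : Int) : Decidable (Spec_balance_puzzle coins index out) := by unfold Spec_balance_puzzle; infer_instance

-- ===== CLAIM (what is proved, stated in full; the proofs are below) =====
def Claim_equal_balance_puzzle : Prop := ∀ (coins : List Int) (index : Int), Dom_balance_puzzle coins index → Spec_balance_puzzle coins index (balance_puzzle coins index)

-- ===== LEMMAS AND PROOFS =====

-- arithmetic facts about A's three-way split
theorem bp_arith (L : Int) (hL : 2 ≤ L) :
    1 ≤ (the_part_nobody_cares_about L).2.1 ∧
    (the_part_nobody_cares_about L).2.2 = 2 * (the_part_nobody_cares_about L).2.1 ∧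
    2 * (the_part_nobody_cares_about L).2.1 ≤ L ∧
    (the_part_nobody_cares_about L).2.1 < L := by
  have hm : PySem.Int.mod L 3 = L % 3 := PySem.Int.mod_eq_emod_of_pos (by norm_num)
  unfold the_part_nobody_cares_about
  simp only [hm, PySem.Int.truncdiv]
  rw [Int.tdiv_eq_ediv_of_nonneg (by split <;> omega)]
  refine ⟨?_, trivial, ?_, ?_⟩ <;> split <;> omega

theorem bpLoop_step (coins : List Int) (fuel : Nat) (lo hi offset q : Int) (h : ¬ hi - lo ≤ 1)
    (hq : q = PySem.Int.floordiv ((hi - lo) -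
      (if PySem.Int.mod (hi - lo) 3 < 2 then PySem.Int.mod (hi - lo) 3 else -1)) 3) :
    bpLoopGo coins (fuel + 1) lo hi offset =
      if (PySem.List.slice coins (some lo) (some (lo + q))).sum >
          (PySem.List.slice coins (some (lo + q)) (some (lo + 2 * q))).sum then
        bpLoopGo coins fuel lo (lo + q) offset
      else if (PySem.List.slice coins (some lo) (some (lo + q))).sum <
          (PySem.List.slice coins (some (lo + q)) (some (lo + 2 * q))).sum then
        bpLoopGo coins fuel (lo + q) (lo + 2 * q) (offset + q)
      else bpLoopGo coins fuel (lo + 2 * q) hi (offset + 2 * q) := by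
  subst hq; rw [bpLoopGo, if_neg h]

theorem balance_puzzle_step (fuel : Nat) (xs : List Int) (index q : Int)
    (h : ¬ (xs.length : Int) ≤ 1)
    (hq : q = (the_part_nobody_cares_about (xs.length : Int)).2.1) :
    balancePuzzleGo (fuel + 1) xs index =
      if (PySem.List.slice xs none (some q)).sum >
          (PySem.List.slice xs (some q) (some (2 * q))).sum then
        balancePuzzleGo fuel (PySem.List.slice xs none (some q)) (index + 0)
      else if (PySem.List.slice xs none (some q)).sum <
          (PySem.List.slice xs (some q) (some (2 * q))).sum then
        balancePuzzleGo fuel (PySem.List.slice xs (some q) (some (2 * q))) (index + q)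
      else balancePuzzleGo fuel (PySem.List.slice xs (some (2 * q))) (index + 2 * q) := by
  subst hq; rw [balancePuzzleGo, if_neg h]; rfl

theorem bpLoop_eq (coins : List Int) (k : Nat) :
    ∀ (fA fB : Nat) (lo hi : Nat) (offset : Int),
      hi - lo = k → k < fA → k < fB → lo ≤ hi → hi ≤ coins.length →
      bpLoopGo coins fB (lo : Int) (hi : Int) offset =
        balancePuzzleGo fA (PySem.List.slice coins (some (lo : Int)) (some (hi : Int))) offset := by
  induction k using Nat.strong_induction_on with
  | _ k IH =>
  intro fA fB lo hi offset hk hfA hfB hle hhi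
  subst hk
  obtain ⟨a, rfl⟩ : ∃ a, fA = a + 1 := ⟨fA - 1, by omega⟩
  obtain ⟨b, rfl⟩ : ∃ b, fB = b + 1 := ⟨fB - 1, by omega⟩
  have hxs : PySem.List.slice coins (some (lo : Int)) (some (hi : Int)) = (coins.drop lo).take (hi - lo) :=
    PySem.List.slice_natCast coins lo hi
  have hlen : ((coins.drop lo).take (hi - lo)).length = hi - lo := by
    simp; omega
  by_cases hsmall : hi - lo ≤ 1
  · rw [bpLoopGo, balancePuzzleGo, hxs, hlen]
    rw [if_pos (by omega : (hi : Int) - (lo : Int) ≤ 1),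
      if_pos (by exact_mod_cast Nat.cast_le.mpr hsmall)]
  · have hL : (hi : Int) - (lo : Int) = ((hi - lo : Nat) : Int) := by omega
    -- B's floordiv equals A's truncdiv-based split point (both divisions are exact)
    have hq : PySem.Int.floordiv (((hi - lo : Nat) : Int) -
        (if PySem.Int.mod ((hi - lo : Nat) : Int) 3 < 2 then PySem.Int.mod ((hi - lo : Nat) : Int) 3 else -1)) 3 =
        (the_part_nobody_cares_about ((hi - lo : Nat) : Int)).2.1 := by
      have hm : PySem.Int.mod ((hi - lo : Nat) : Int) 3 = ((hi - lo : Nat) : Int) % 3 :=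
        PySem.Int.mod_eq_emod_of_pos (by norm_num)
      unfold the_part_nobody_cares_about
      simp only [hm, PySem.Int.truncdiv, PySem.Int.floordiv_eq_ediv_of_pos (by norm_num : (0:Int) < 3)]
      rw [Int.tdiv_eq_ediv_of_nonneg (by split <;> omega)]
    obtain ⟨h1, h2, h3, h4⟩ := bp_arith ((hi - lo : Nat) : Int) (by omega)
    set q := (the_part_nobody_cares_about ((hi - lo : Nat) : Int)).2.1 with hqdef
    set mn : Nat := q.toNat with hmndef
    have hmc : q = (mn : Int) := by omega
    have hm1 : 1 ≤ mn := by omega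
    have hm2 : 2 * mn ≤ hi - lo := by omega
    have hm3 : mn < hi - lo := by omega
    rw [bpLoop_step coins b (lo : Int) (hi : Int) offset ((mn : Nat) : Int) (by omega)
      (by rw [hL, hq, hmc])]
    rw [hxs]
    rw [balance_puzzle_step a ((coins.drop lo).take (hi - lo)) offset ((mn : Nat) : Int)
      (by rw [hlen]; omega) (by rw [hlen, ← hqdef, hmc])]
    -- slice identities
    have c1 : (lo : Int) + (mn : Int) = ((lo + mn : Nat) : Int) := by push_cast; ring
    have c2 : (lo : Int) + 2 * (mn : Int) = ((lo + 2 * mn : Nat) : Int) := by push_cast; ring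
    have c3 : 2 * ((mn : Nat) : Int) = ((2 * mn : Nat) : Int) := by push_cast; ring
    have eB1 : PySem.List.slice coins (some ((lo : Int))) (some ((lo : Int) + (mn : Int))) =
        (coins.drop lo).take mn := by
      rw [c1, PySem.List.slice_natCast]; congr 1; omega
    have eB2 : PySem.List.slice coins (some ((lo : Int) + (mn : Int))) (some ((lo : Int) + 2 * (mn : Int))) =
        (coins.drop (lo + mn)).take mn := by
      rw [c1, c2, PySem.List.slice_natCast]; congr 1; omega
    have eA1 : PySem.List.slice ((coins.drop lo).take (hi - lo)) none (some ((mn : Nat) : Int)) =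
        (coins.drop lo).take mn := by
      rw [PySem.List.slice_to_natCast, List.take_take]; congr 1; omega
    have eA2 : PySem.List.slice ((coins.drop lo).take (hi - lo)) (some ((mn : Nat) : Int)) (some (2 * ((mn : Nat) : Int))) =
        (coins.drop (lo + mn)).take mn := by
      rw [c3, PySem.List.slice_natCast, List.drop_take, List.drop_drop, List.take_take]
      congr 1; omega
    have eA3 : PySem.List.slice ((coins.drop lo).take (hi - lo)) (some (2 * ((mn : Nat) : Int))) =
        (coins.drop (lo + 2 * mn)).take (hi - (lo + 2 * mn)) := by
      rw [c3, PySem.List.slice_from_natCast, List.drop_take, List.drop_drop]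
      congr 1; omega
    have eS1 : PySem.List.slice coins (some ((lo + mn : Nat) : Int)) (some ((lo + 2 * mn : Nat) : Int)) =
        (coins.drop (lo + mn)).take mn := by
      rw [PySem.List.slice_natCast]; congr 1; omega
    rw [eB1, eB2, eA1, eA2, eA3, add_zero]
    by_cases hgt : ((coins.drop (lo + mn)).take mn).sum < ((coins.drop lo).take mn).sum
    · rw [if_pos hgt, if_pos hgt]
      have hIH1 := IH mn (by omega) a b lo (lo + mn) offset (by omega) (by omega) (by omega) (by omega) (by omega)
      rw [c1, hIH1, PySem.List.slice_natCast, Nat.add_sub_cancel_left]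
    · rw [if_neg hgt, if_neg hgt]
      by_cases hlt : ((coins.drop lo).take mn).sum < ((coins.drop (lo + mn)).take mn).sum
      · rw [if_pos hlt, if_pos hlt]
        have hIH2 := IH mn (by omega) a b (lo + mn) (lo + 2 * mn) (offset + (mn : Int)) (by omega) (by omega) (by omega) (by omega) (by omega)
        rw [c1, c2, hIH2, eS1]
      · rw [if_neg hlt, if_neg hlt]
        have hIH3 := IH (hi - (lo + 2 * mn)) (by omega) a b (lo + 2 * mn) hi (offset + 2 * (mn : Int)) (by omega) (by omega) (by omega) (by omega) (by omega)
        rw [c2, hIH3, PySem.List.slice_natCast]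

-- ===== VERDICT (by name: the statement is the Claim_ definition above) =====
theorem balance_puzzle_spec : Claim_equal_balance_puzzle := by
  intro coins index _
  unfold Spec_balance_puzzle balance_puzzle_alt balance_puzzle
  have h := bpLoop_eq coins (coins.length - 0) (coins.length + 1) (coins.length + 1)
    0 coins.length index rfl (by omega) (by omega) (by omega) (by omega)
  rw [Nat.cast_zero] at h
  rw [h]
  have hs : PySem.List.slice coins (some (0:Int)) (some (coins.length : Int)) = coins := by
    rw [← Nat.cast_zero, PySem.List.slice_natCast]; simp
  rw [hs]
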